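-- pv_equiv track=rewrite | github.com/schepa123/PII_Detection | src/evaluate/prepare_evaluation.py | merge_overlapping_elements
-- ===== SOURCE A (Python) =====
-- def merge_overlapping_elements(
--     position_dict: dict[str, list[int]]
-- ) -> dict[str, list[int]]:
--     """
--     Merges overlapping position ranges if the left element of
--     one entry is smaller than the left element of another and
--     the right element is the same.
--
--     Args:
--
--     """
--     key = list(position_dict.keys())[0]
--     position_list = position_dict[key]
--     best_left_for_right = {}
--
--     for pair in position_list:
--         left, right = pair
--
--         if right in best_left_for_right:
--             if left < best_left_for_right[right]:
--                 best_left_for_right[right] = left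
--         else:
--             best_left_for_right[right] = left
--     merged = [[left, right] for right, left in best_left_for_right.items()]
--     merged.sort(key=lambda x: (x[1], x[0]))
--     return {key: merged}
-- ===== SOURCE B (Python) =====
-- def merge_overlapping_elements(
--     position_dict: dict[str, list[int]]
-- ) -> dict[str, list[int]]:
--     key, position_list = next(iter(position_dict.items()))
--     merged = []
--     prev_right = None
--     for left, right in sorted(position_list, key=lambda p: (p[1], p[0])):
--         if prev_right is None or right != prev_right:
--             merged.append([left, right])
--             prev_right = right
--     return {key: merged}
-- ===== Notes on version B (the rewrite author's own statement) =====
-- stated objective: alternative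
-- what changed: Replaces the min-per-right dictionary plus final sort by a single sort of the pair list by (right, left) followed by one linear run-scan that keeps the first pair of each right-run.
-- outside the precondition, e.g. on merge_overlapping_elements({}): A raises IndexError, B raises StopIteration
import Mathlib
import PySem

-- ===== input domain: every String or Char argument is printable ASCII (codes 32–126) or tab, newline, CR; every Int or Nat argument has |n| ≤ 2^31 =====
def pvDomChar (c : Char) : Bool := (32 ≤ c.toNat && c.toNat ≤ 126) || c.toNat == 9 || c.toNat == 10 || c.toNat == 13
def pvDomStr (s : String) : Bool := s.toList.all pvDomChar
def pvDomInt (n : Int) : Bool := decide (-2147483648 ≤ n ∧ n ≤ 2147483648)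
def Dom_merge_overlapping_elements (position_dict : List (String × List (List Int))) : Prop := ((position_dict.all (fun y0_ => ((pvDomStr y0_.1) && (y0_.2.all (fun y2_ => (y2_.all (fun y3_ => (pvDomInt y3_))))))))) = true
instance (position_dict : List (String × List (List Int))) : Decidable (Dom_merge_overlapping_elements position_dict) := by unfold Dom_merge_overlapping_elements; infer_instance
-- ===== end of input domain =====

-- B replaces A's min-per-right dictionary plus final sort by one sort of the pair list
-- by (right, left) followed by a single run-scan keeping the first pair of each right-run
-- (alternative decomposition, same asymptotic cost).

-- ===== PORT A =====
def merge_overlapping_elements (position_dict : List (String × List (List Int))) : List (String × List (List Int)) :=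
  let d : PySem.Dict String (List (List Int)) := PySem.Dict.mk position_dict
  match PySem.List.pyGet? d.keys 0 with
  | none => []            -- IndexError on the empty dict: excluded by Pre_
  | some key =>
    match d.get? key with
    | none => []          -- unreachable: key is taken from d.keys
    | some position_list =>
      let best := position_list.foldl
        (fun (b : PySem.Dict Int Int) pair =>
          -- 'left, right = pair' : exact under Pre_ (each pair has length 2)
          let left := PySem.List.pyGetD pair 0 0
          let right := PySem.List.pyGetD pair 1 0
          if b.contains right then
            if left < b.getD right 0 then b.insert right left else b
          else b.insert right left)
        PySem.Dict.empty
      let merged := best.items.map (fun rl => [rl.2, rl.1])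
      let sortedMerged := PySem.List.sorted2 merged
        (fun x => PySem.List.pyGetD x 1 0) (fun x => PySem.List.pyGetD x 0 0)
      [(key, sortedMerged)]

-- ===== PORT B =====
def merge_overlapping_elements_alt (position_dict : List (String × List (List Int))) : List (String × List (List Int)) :=
  match position_dict with
  | [] => []              -- next(iter(...)) on the empty dict raises StopIteration: excluded by Pre_
  | (key, position_list) :: _ =>
    let sortedPairs := PySem.List.sorted2 position_list
      (fun p => PySem.List.pyGetD p 1 0) (fun p => PySem.List.pyGetD p 0 0)
    let final := sortedPairs.foldl
      (fun (st : List (List Int) × Option Int) p =>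
        -- 'for left, right in ...' : exact under Pre_ (each pair has length 2)
        let left := PySem.List.pyGetD p 0 0
        let right := PySem.List.pyGetD p 1 0
        if st.2 = none ∨ st.2 ≠ some right then
          (st.1 ++ [[left, right]], some right)
        else st)
      ([], none)
    [(key, final.1)]

-- ===== PRECONDITION & SPEC =====
-- Pre_ excludes exactly the inputs where Python A raises: the empty dict (IndexError on
-- list(keys)[0]) and a first value whose entries are not length-2 pairs (unpacking error).
def Pre_merge_overlapping_elements (position_dict : List (String × List (List Int))) : Prop :=
  position_dict ≠ [] ∧ ∀ kv ∈ position_dict.take 1, ∀ pair ∈ kv.2, pair.length = 2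
instance (position_dict : List (String × List (List Int))) : Decidable (Pre_merge_overlapping_elements position_dict) := by unfold Pre_merge_overlapping_elements; infer_instance
def pvWitness_merge_overlapping_elements : (List (String × List (List Int))) := [("a", [[1, 3], [0, 3], [5, 7]])]

def Spec_merge_overlapping_elements (position_dict : List (String × List (List Int))) (out : List (String × List (List Int))) : Prop := out = merge_overlapping_elements_alt position_dict
instance (position_dict : List (String × List (List Int))) (out : List (String × List (List Int))) : Decidable (Spec_merge_overlapping_elements position_dict out) := by unfold Spec_merge_overlapping_elements; infer_instance

-- ===== CLAIM (what is proved, stated in full; the proofs are below) =====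
def Claim_equal_merge_overlapping_elements : Prop := ∀ (position_dict : List (String × List (List Int))), Dom_merge_overlapping_elements position_dict → Pre_merge_overlapping_elements position_dict → Spec_merge_overlapping_elements position_dict (merge_overlapping_elements position_dict)

-- ===== LEMMAS AND PROOFS =====

-- right / left accessor of a pair, and the tuple sort key (p[1], p[0]) as a lexicographic key
def pvR (p : List Int) : Int := PySem.List.pyGetD p 1 0
def pvL (p : List Int) : Int := PySem.List.pyGetD p 0 0
def pvKey (p : List Int) : Lex (Int × Int) := toLex (pvR p, pvL p)

-- minimum left among the pairs of pl whose right is r (0 if there is none)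
def pvMinL (pl : List (List Int)) (r : Int) : Int :=
  match (pl.filter (fun p => pvR p == r)).map pvL with
  | [] => 0
  | a :: t => t.foldl min a

-- the run-scan of B, as a structural recursion
def pvRuns : Option Int → List (List Int) → List (List Int)
  | _, [] => []
  | r0, p :: t =>
    if r0 = none ∨ r0 ≠ some (pvR p) then [pvL p, pvR p] :: pvRuns (some (pvR p)) t
    else pvRuns r0 t

-- A's loop body and B's loop body, named
def pvStepA (b : PySem.Dict Int Int) (pair : List Int) : PySem.Dict Int Int :=
  if b.contains (pvR pair) then
    if pvL pair < b.getD (pvR pair) 0 then b.insert (pvR pair) (pvL pair) else b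
  else b.insert (pvR pair) (pvL pair)

def pvStepB (st : List (List Int) × Option Int) (p : List Int) : List (List Int) × Option Int :=
  if st.2 = none ∨ st.2 ≠ some (pvR p) then (st.1 ++ [[pvL p, pvR p]], some (pvR p)) else st

-- ---- generic facts about PySem.Set.ofList ----

theorem pv_add_nil (x : Int) : PySem.Set.add [] x = [x] := by
  simp [PySem.Set.add]

theorem pv_foldl_add_eq (n : Nat) : ∀ (xs : List Int), xs.length ≤ n → ∀ (s : PySem.Set Int), s.Nodup →
    List.foldl PySem.Set.add s xs = s ++ PySem.Set.ofList (xs.filter (fun y => decide (y ∉ s))) := by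
  induction n with
  | zero =>
    intro xs h s _
    have : xs = [] := List.eq_nil_of_length_eq_zero (Nat.le_zero.mp h)
    subst this
    simp [PySem.Set.ofList_eq_foldl]
  | succ n ih =>
    intro xs h s hs
    cases xs with
    | nil => simp [PySem.Set.ofList_eq_foldl]
    | cons y ys =>
      simp only [List.foldl_cons]
      by_cases hy : y ∈ s
      · rw [PySem.Set.add_of_mem hy]
        have hfil : List.filter (fun y' => decide (y' ∉ s)) (y :: ys) = List.filter (fun y' => decide (y' ∉ s)) ys := by
          simp [hy]
        rw [hfil]
        exact ih ys (by simpa using Nat.le_of_succ_le_succ h) s hs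
      · rw [PySem.Set.add_of_not_mem hy]
        have hnd : (s ++ [y]).Nodup := by
          refine List.Nodup.append hs (List.nodup_singleton y) ?_
          intro a ha hay
          rw [List.mem_singleton] at hay
          exact hy (hay ▸ ha)
        rw [ih ys (by simpa using Nat.le_of_succ_le_succ h) (s ++ [y]) hnd]
        have hfil : List.filter (fun y' => decide (y' ∉ s)) (y :: ys) = y :: List.filter (fun y' => decide (y' ∉ s)) ys := by
          simp [hy]
        rw [hfil]
        have hys : (List.filter (fun y' => decide (y' ∉ s)) ys).length ≤ n := by
          calc (List.filter (fun y' => decide (y' ∉ s)) ys).length ≤ ys.length := List.length_filter_le _ _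
          _ ≤ n := by simpa using Nat.le_of_succ_le_succ h
        have : PySem.Set.ofList (y :: List.filter (fun y' => decide (y' ∉ s)) ys)
            = [y] ++ PySem.Set.ofList ((List.filter (fun y' => decide (y' ∉ s)) ys).filter (fun z => decide (z ∉ ([y] : List Int)))) := by
          rw [PySem.Set.ofList_eq_foldl]
          simp only [List.foldl_cons, pv_add_nil]
          rw [ih _ hys [y] (List.nodup_singleton y)]
        rw [this]
        rw [List.filter_filter]
        have hcong : List.filter (fun a => decide (a ∉ ([y] : List Int)) && decide (a ∉ s)) ys
            = List.filter (fun a => decide (a ∉ s ++ [y])) ys := by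
          apply List.filter_congr
          intro a _
          simp only [List.mem_append, List.mem_singleton]
          by_cases h1 : a = y <;> by_cases h2 : a ∈ s <;> simp [h1, h2]
        rw [hcong, List.append_assoc]


theorem pv_ofList_cons (x : Int) (xs : List Int) :
    PySem.Set.ofList (x :: xs) = x :: PySem.Set.ofList (xs.filter (fun y => y ≠ x)) := by
  rw [PySem.Set.ofList_eq_foldl]
  simp only [List.foldl_cons, pv_add_nil]
  rw [pv_foldl_add_eq xs.length xs le_rfl [x] (List.nodup_singleton x)]
  have : List.filter (fun y => decide (y ∉ ([x] : List Int))) xs = List.filter (fun y => y ≠ x) xs := by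
    apply List.filter_congr
    intro a _
    simp
  rw [this]
  rfl


theorem pv_ofList_pairwise_lt_aux (n : Nat) : ∀ (xs : List Int), xs.length ≤ n → xs.Pairwise (· ≤ ·) →
    (PySem.Set.ofList xs).Pairwise (· < ·) := by
  induction n with
  | zero =>
    intro xs h _
    have : xs = [] := List.eq_nil_of_length_eq_zero (Nat.le_zero.mp h)
    subst this
    simp [PySem.Set.ofList_eq_foldl]
  | succ n ih =>
    intro xs h hp
    cases xs with
    | nil => simp [PySem.Set.ofList_eq_foldl]
    | cons x ys =>
      rw [pv_ofList_cons]
      rw [List.pairwise_cons] at hp ⊢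
      constructor
      · intro y hy
        rw [PySem.Set.mem_ofList] at hy
        have := List.of_mem_filter hy
        have hne : y ≠ x := by simpa using this
        exact lt_of_le_of_ne (hp.1 y (List.mem_of_mem_filter hy)) (Ne.symm hne)
      · exact ih _ (le_trans (List.length_filter_le _ _) (by simpa using Nat.le_of_succ_le_succ h)) (hp.2.filter _)

theorem pv_ofList_pairwise_lt (xs : List Int) (h : xs.Pairwise (· ≤ ·)) :
    (PySem.Set.ofList xs).Pairwise (· < ·) :=
  pv_ofList_pairwise_lt_aux xs.length xs le_rfl h

theorem pv_ofList_append_singleton (xs : List Int) (x : Int) :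
    PySem.Set.ofList (xs ++ [x]) = PySem.Set.add (PySem.Set.ofList xs) x := by
  simp [PySem.Set.ofList_eq_foldl, List.foldl_append]

-- ---- facts about pvMinL ----

theorem pv_foldl_min_eq_self (l : List Int) : ∀ (a : Int), (∀ x ∈ l, a ≤ x) → l.foldl min a = a := by
  induction l with
  | nil => intro a _; rfl
  | cons x t ih =>
    intro a h
    simp only [List.foldl_cons]
    rw [min_eq_left (h x List.mem_cons_self)]
    exact ih a (fun y hy => h y (List.mem_cons_of_mem _ hy))


theorem pv_min?_perm {l₁ l₂ : List Int} (h : l₁.Perm l₂) : l₁.min? = l₂.min? := by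
  cases e : l₂.min? with
  | none =>
    rw [List.min?_eq_none_iff] at e ⊢
    subst e
    exact h.eq_nil
  | some m =>
    rw [List.min?_eq_some_iff] at e ⊢
    exact ⟨h.mem_iff.mpr e.1, fun b hb => e.2 b (h.mem_iff.mp hb)⟩

theorem pv_minL_perm {pl₁ pl₂ : List (List Int)} (h : pl₁.Perm pl₂) (r : Int) :
    pvMinL pl₁ r = pvMinL pl₂ r := by
  unfold pvMinL
  have hm : ((pl₁.filter (fun p => pvR p == r)).map pvL).Perm ((pl₂.filter (fun p => pvR p == r)).map pvL) :=
    (h.filter _).map _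
  have h' := pv_min?_perm hm
  cases e₁ : (pl₁.filter (fun p => pvR p == r)).map pvL with
  | nil =>
    cases e₂ : (pl₂.filter (fun p => pvR p == r)).map pvL with
    | nil => rfl
    | cons b u => rw [e₁, e₂] at hm; exact absurd hm.symm.eq_nil (by simp)
  | cons a t =>
    cases e₂ : (pl₂.filter (fun p => pvR p == r)).map pvL with
    | nil => rw [e₁, e₂] at hm; exact absurd hm.eq_nil (by simp)
    | cons b u =>
      rw [e₁, e₂] at h'
      rw [List.min?_cons', List.min?_cons'] at h'
      exact Option.some.inj h'


theorem pv_minL_append_ne (pl : List (List Int)) (p : List Int) (r : Int) (h : r ≠ pvR p) :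
    pvMinL (pl ++ [p]) r = pvMinL pl r := by
  unfold pvMinL
  rw [List.filter_append]
  have : List.filter (fun q => pvR q == r) [p] = [] := by
    simp [Ne.symm h]
  rw [this, List.append_nil]


theorem pv_minL_append_self_mem (pl : List (List Int)) (p : List Int)
    (h : pvR p ∈ pl.map pvR) :
    pvMinL (pl ++ [p]) (pvR p) = min (pvMinL pl (pvR p)) (pvL p) := by
  unfold pvMinL
  rw [List.filter_append]
  have hone : List.filter (fun q => pvR q == pvR p) [p] = [p] := by simp
  rw [hone]
  have hne : List.filter (fun q => pvR q == pvR p) pl ≠ [] := by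
    rw [Ne, List.filter_eq_nil_iff]
    simp only [not_forall]
    obtain ⟨q, hq, hqr⟩ := List.mem_map.mp h
    exact ⟨q, hq, by simp [hqr]⟩
  cases e : List.filter (fun q => pvR q == pvR p) pl with
  | nil => exact absurd e hne
  | cons a t =>
    rw [List.map_append, List.map_cons]
    simp only [List.map_cons] at *
    show (t.map pvL ++ [pvL p]).foldl min (pvL a) = min ((t.map pvL).foldl min (pvL a)) (pvL p)
    rw [List.foldl_append]
    rfl


theorem pv_minL_append_self_fresh (pl : List (List Int)) (p : List Int)
    (h : pvR p ∉ pl.map pvR) :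
    pvMinL (pl ++ [p]) (pvR p) = pvL p := by
  unfold pvMinL
  rw [List.filter_append]
  have hnil : List.filter (fun q => pvR q == pvR p) pl = [] := by
    rw [List.filter_eq_nil_iff]
    intro q hq
    simp only [beq_iff_eq]
    intro hqr
    exact h (List.mem_map.mpr ⟨q, hq, hqr⟩)
  have hone : List.filter (fun q => pvR q == pvR p) [p] = [p] := by simp
  rw [hnil, hone, List.nil_append, List.map_cons, List.map_nil]
  rfl


theorem pv_minL_cons_ne (q : List Int) (t : List (List Int)) (r : Int) (h : r ≠ pvR q) :
    pvMinL (q :: t) r = pvMinL t r := by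
  unfold pvMinL
  rw [List.filter_cons]
  simp [Ne.symm h]


theorem pv_minL_filter_ne (t : List (List Int)) (rp r : Int) (h : r ≠ rp) :
    pvMinL (t.filter (fun q => pvR q ≠ rp)) r = pvMinL t r := by
  unfold pvMinL
  rw [List.filter_filter]
  have : List.filter (fun a => (pvR a == r) && decide (pvR a ≠ rp)) t = List.filter (fun a => pvR a == r) t := by
    apply List.filter_congr
    intro a _
    by_cases e : pvR a = r
    · simp [e, h]
    · simp [e]
  rw [this]


theorem pv_loopA_items (pl : List (List Int)) :
    (List.foldl pvStepA PySem.Dict.empty pl).items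
      = (PySem.Set.ofList (pl.map pvR)).map (fun r => (r, pvMinL pl r)) := by
  induction pl using List.reverseRecOn with
  | nil => simp [PySem.Dict.empty, PySem.Set.ofList_eq_foldl]
  | append_singleton pl p ih =>
    rw [List.foldl_append, List.foldl_cons, List.foldl_nil]
    set d := List.foldl pvStepA PySem.Dict.empty pl with hd
    have hkeys : d.keys = PySem.Set.ofList (pl.map pvR) := by
      show d.items.map (fun x => x.1) = _
      rw [ih, List.map_map]
      simp [Function.comp_def]
    have hnd : d.keys.Nodup := by rw [hkeys]; exact PySem.Set.nodup_ofList _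
    rw [List.map_append, List.map_singleton, pv_ofList_append_singleton]
    unfold pvStepA
    by_cases hc : pvR p ∈ pl.map pvR
    · have hcont : d.contains (pvR p) = true :=
        (PySem.Dict.contains_iff_mem_keys _ _).mpr (by rw [hkeys]; exact (PySem.Set.mem_ofList _ _).mpr hc)
      have hmemitems : (pvR p, pvMinL pl (pvR p)) ∈ d.items := by
        rw [ih]
        exact List.mem_map_of_mem ((PySem.Set.mem_ofList _ _).mpr hc)
      have hget : d.getD (pvR p) 0 = pvMinL pl (pvR p) :=
        PySem.Dict.getD_of_mem_items _ hmemitems hnd 0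
      rw [hcont, if_pos rfl, hget]
      rw [PySem.Set.add_of_mem ((PySem.Set.mem_ofList _ _).mpr hc)]
      by_cases hlt : pvL p < pvMinL pl (pvR p)
      · rw [if_pos hlt]
        rw [PySem.Dict.items_insert_of_contains _ _ hcont, ih, List.map_map]
        apply List.map_congr_left
        intro r hr
        by_cases e : r = pvR p
        · subst e
          simp only [Function.comp_apply, beq_self_eq_true, if_true]
          rw [pv_minL_append_self_mem pl p hc]
          rw [min_eq_right (le_of_lt hlt)]
        · simp only [Function.comp_apply, beq_iff_eq, e, if_false]
          rw [pv_minL_append_ne pl p r e]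
      · rw [if_neg hlt, ih]
        apply List.map_congr_left
        intro r hr
        by_cases e : r = pvR p
        · subst e
          rw [pv_minL_append_self_mem pl p hc]
          rw [min_eq_left (not_lt.mp hlt)]
        · rw [pv_minL_append_ne pl p r e]
    · have hcont : d.contains (pvR p) = false := by
        rw [PySem.Dict.contains_eq_decide_mem_keys, hkeys]
        simp only [decide_eq_false_iff_not]
        rw [PySem.Set.mem_ofList]
        exact hc
      rw [hcont]
      simp only [Bool.false_eq_true, if_false]
      rw [PySem.Dict.items_insert_of_not_contains _ _ hcont, ih]
      rw [PySem.Set.add_of_not_mem (by rw [PySem.Set.mem_ofList]; exact hc)]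
      rw [List.map_append, List.map_singleton]
      congr 1
      · apply List.map_congr_left
        intro r hr
        have hrne : r ≠ pvR p := by
          rintro rfl
          exact hc ((PySem.Set.mem_ofList _ _).mp hr)
        rw [pv_minL_append_ne pl p r hrne]
      · rw [pv_minL_append_self_fresh pl p hc]


theorem pv_sorted2_eq_sorted (xs : List (List Int)) :
    PySem.List.sorted2 xs (fun x => PySem.List.pyGetD x 1 0) (fun x => PySem.List.pyGetD x 0 0)
      = PySem.List.sorted xs pvKey := by
  show List.foldl (fun acc x => PySem.List.insertBy
        (fun a b => decide (PySem.List.pyGetD a 1 0 < PySem.List.pyGetD b 1 0)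
          || (!decide (PySem.List.pyGetD b 1 0 < PySem.List.pyGetD a 1 0)
              && decide (PySem.List.pyGetD a 0 0 < PySem.List.pyGetD b 0 0))) x acc) [] xs
      = List.foldl (fun acc x => PySem.List.insertBy (fun a b => decide (pvKey a < pvKey b)) x acc) [] xs
  have hbe : (fun (a b : List Int) => decide (PySem.List.pyGetD a 1 0 < PySem.List.pyGetD b 1 0)
          || (!decide (PySem.List.pyGetD b 1 0 < PySem.List.pyGetD a 1 0)
              && decide (PySem.List.pyGetD a 0 0 < PySem.List.pyGetD b 0 0)))
      = (fun a b => decide (pvKey a < pvKey b)) := by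
    funext a b
    rcases lt_trichotomy (PySem.List.pyGetD a 1 0) (PySem.List.pyGetD b 1 0) with h1 | h1 | h1
    · simp [pvKey, Prod.Lex.lt_iff, pvR, pvL, h1]
    · simp [pvKey, Prod.Lex.lt_iff, pvR, pvL, h1]
    · simp [pvKey, Prod.Lex.lt_iff, pvR, pvL, h1, asymm h1, ne_of_gt h1]
  rw [hbe]


theorem pv_foldB_eq_runs (s : List (List Int)) : ∀ acc r0,
    (List.foldl pvStepB (acc, r0) s).1 = acc ++ pvRuns r0 s := by
  induction s with
  | nil => intro acc r0; simp [pvRuns]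
  | cons p t ih =>
    intro acc r0
    rw [List.foldl_cons]
    by_cases hcond : r0 = none ∨ r0 ≠ some (pvR p)
    · rw [show pvStepB (acc, r0) p = (acc ++ [[pvL p, pvR p]], some (pvR p)) from by
        unfold pvStepB; rw [if_pos hcond]]
      rw [ih, pvRuns, if_pos hcond, List.append_assoc]
      rfl
    · rw [show pvStepB (acc, r0) p = (acc, r0) from by unfold pvStepB; rw [if_neg hcond]]
      rw [ih, pvRuns, if_neg hcond]


theorem pv_runs_skip (t : List (List Int)) : ∀ r0 : Int, (∀ q ∈ t, r0 ≤ pvR q) →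
    t.Pairwise (fun a b => pvR a ≤ pvR b) →
    pvRuns (some r0) t = pvRuns none (t.filter (fun q => pvR q ≠ r0)) := by
  induction t with
  | nil => intro r0 _ _; rfl
  | cons q tt ih =>
    intro r0 hb hp
    rw [List.pairwise_cons] at hp
    by_cases e : pvR q = r0
    · rw [pvRuns, if_neg (by simp [e])]
      rw [List.filter_cons, if_neg (by simp [e])]
      exact ih r0 (fun a ha => hb a (List.mem_cons_of_mem _ ha)) hp.2
    · have hlt : r0 < pvR q := lt_of_le_of_ne (hb q List.mem_cons_self) (Ne.symm e)
      rw [pvRuns, if_pos (by simp [Ne.symm e])]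
      rw [List.filter_cons, if_pos (by simp [e])]
      rw [pvRuns, if_pos (by simp)]
      congr 1
      have hfil : tt.filter (fun a => pvR a ≠ r0) = tt := by
        rw [List.filter_eq_self]
        intro a ha
        have : pvR q ≤ pvR a := hp.1 a ha
        simp only [ne_eq, decide_eq_true_eq]
        omega
      rw [hfil]


theorem pv_key_le {a b : List Int} (h : pvKey a ≤ pvKey b) : pvR a ≤ pvR b := by
  rcases Prod.Lex.le_iff.mp h with h1 | ⟨h1, _⟩
  · exact le_of_lt h1
  · exact le_of_eq h1

theorem pv_minL_cons_self (p : List Int) (t : List (List Int))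
    (h : ∀ q ∈ t, pvKey p ≤ pvKey q) : pvMinL (p :: t) (pvR p) = pvL p := by
  unfold pvMinL
  rw [List.filter_cons, if_pos (by simp)]
  rw [List.map_cons]
  apply pv_foldl_min_eq_self
  intro x hx
  obtain ⟨q, hq, rfl⟩ := List.mem_map.mp hx
  have hq' := List.mem_of_mem_filter hq
  have hqr : pvR q = pvR p := by simpa using List.of_mem_filter hq
  rcases Prod.Lex.le_iff.mp (h q hq') with h1 | ⟨_, h2⟩
  · simp only [pvKey, ofLex_toLex] at h1; omega
  · simpa [pvKey] using h2

theorem pv_runs_char_aux (n : Nat) : ∀ (s : List (List Int)), s.length ≤ n →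
    s.Pairwise (fun a b => pvKey a ≤ pvKey b) →
    pvRuns none s = (PySem.Set.ofList (s.map pvR)).map (fun r => [pvMinL s r, r]) := by
  induction n with
  | zero =>
    intro s h _
    have : s = [] := List.eq_nil_of_length_eq_zero (Nat.le_zero.mp h)
    subst this
    simp [pvRuns, PySem.Set.ofList_eq_foldl]
  | succ n ih =>
    intro s h hs
    cases s with
    | nil => simp [pvRuns, PySem.Set.ofList_eq_foldl]
    | cons p t =>
      rw [List.pairwise_cons] at hs
      have hhead := hs.1
      have ht := hs.2
      have hbR : ∀ q ∈ t, pvR p ≤ pvR q := fun q hq => pv_key_le (hhead q hq)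
      have htR : t.Pairwise (fun a b => pvR a ≤ pvR b) := ht.imp pv_key_le
      rw [pvRuns, if_pos (by simp)]
      rw [pv_runs_skip t (pvR p) hbR htR]
      set t' := t.filter (fun q => pvR q ≠ pvR p) with ht'
      have hlen : t'.length ≤ n := le_trans (List.length_filter_le _ _) (by simpa using Nat.le_of_succ_le_succ h)
      rw [ih t' hlen (ht.filter _)]
      rw [List.map_cons, pv_ofList_cons]
      have hmapfil : (t.map pvR).filter (fun r => r ≠ pvR p) = t'.map pvR := by
        rw [ht', List.filter_map]
        rfl
      rw [hmapfil, List.map_cons]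
      congr 1
      · rw [pv_minL_cons_self p t hhead]
      · apply List.map_congr_left
        intro r hr
        have hrt' : r ∈ t'.map pvR := (PySem.Set.mem_ofList _ _).mp hr
        have hrne : r ≠ pvR p := by
          obtain ⟨q, hq, rfl⟩ := List.mem_map.mp hrt'
          simpa using List.of_mem_filter hq
        rw [pv_minL_filter_ne t (pvR p) r hrne, pv_minL_cons_ne p t r hrne]

theorem pv_runs_char (s : List (List Int)) (hs : s.Pairwise (fun a b => pvKey a ≤ pvKey b)) :
    pvRuns none s = (PySem.Set.ofList (s.map pvR)).map (fun r => [pvMinL s r, r]) :=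
  pv_runs_char_aux s.length s le_rfl hs

-- ===== VERDICT (by name: the statement is the Claim_ definition above) =====

theorem pv_key_pair (a b : Int) : pvKey [a, b] = toLex (b, a) := by
  simp [pvKey, pvR, pvL, PySem.List.pyGetD_ofNat']

theorem pv_main (v : List (List Int)) :
    PySem.List.sorted2
        ((List.foldl pvStepA PySem.Dict.empty v).items.map (fun rl => [rl.2, rl.1]))
        (fun x => PySem.List.pyGetD x 1 0) (fun x => PySem.List.pyGetD x 0 0)
      = (List.foldl pvStepB (([] : List (List Int)), (none : Option Int))
          (PySem.List.sorted2 v (fun p => PySem.List.pyGetD p 1 0) (fun p => PySem.List.pyGetD p 0 0))).1 := by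
  rw [pv_sorted2_eq_sorted v]
  set s := PySem.List.sorted v pvKey with hsdef
  have hsp : s.Pairwise (fun a b => pvKey a ≤ pvKey b) := PySem.List.sorted_pairwise v pvKey
  have hperm : s.Perm v := PySem.List.sorted_perm v pvKey false
  rw [pv_foldB_eq_runs, List.nil_append, pv_runs_char s hsp]
  have hvals : (PySem.Set.ofList (s.map pvR)).map (fun r => [pvMinL s r, r])
      = (PySem.Set.ofList (s.map pvR)).map (fun r => [pvMinL v r, r]) := by
    apply List.map_congr_left
    intro r _
    rw [pv_minL_perm hperm r]
  rw [hvals]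
  -- A's unsorted list is the same map over the ofList of v's rights
  have hXA : (List.foldl pvStepA PySem.Dict.empty v).items.map (fun rl => [rl.2, rl.1])
      = (PySem.Set.ofList (v.map pvR)).map (fun r => [pvMinL v r, r]) := by
    rw [pv_loopA_items, List.map_map]
    rfl
  rw [hXA, pv_sorted2_eq_sorted]
  apply PySem.List.sorted_eq_of_perm_of_pairwise_lt
  · -- permutation
    apply List.Perm.map
    rw [List.perm_ext_iff_of_nodup (PySem.Set.nodup_ofList _) (PySem.Set.nodup_ofList _)]
    intro a
    rw [PySem.Set.mem_ofList, PySem.Set.mem_ofList]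
    exact (hperm.map pvR).mem_iff
  · -- strictly increasing under pvKey
    have h1 : (s.map pvR).Pairwise (· ≤ ·) := by
      rw [List.pairwise_map]
      exact hsp.imp pv_key_le
    have h2 : (PySem.Set.ofList (s.map pvR)).Pairwise (· < ·) := pv_ofList_pairwise_lt _ h1
    rw [List.pairwise_map]
    apply h2.imp
    intro a b hab
    rw [pv_key_pair, pv_key_pair]
    exact Prod.Lex.lt_iff.mpr (Or.inl (by simpa using hab))

theorem merge_overlapping_elements_spec : Claim_equal_merge_overlapping_elements := by
  intro pd _ hpre
  obtain ⟨hne, _⟩ := hpre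
  cases pd with
  | nil => exact absurd rfl hne
  | cons kv rest =>
    obtain ⟨k, v⟩ := kv
    show merge_overlapping_elements ((k, v) :: rest) = merge_overlapping_elements_alt ((k, v) :: rest)
    have hA : merge_overlapping_elements ((k, v) :: rest)
        = [(k, PySem.List.sorted2
            ((List.foldl pvStepA PySem.Dict.empty v).items.map (fun rl => [rl.2, rl.1]))
            (fun x => PySem.List.pyGetD x 1 0) (fun x => PySem.List.pyGetD x 0 0))] := by
      unfold merge_overlapping_elements
      simp only [PySem.Dict.keys, List.map_cons, PySem.List.pyGet?_zero_cons,
        PySem.Dict.get?_mk_cons, beq_self_eq_true, if_true]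
      rfl
    have hB : merge_overlapping_elements_alt ((k, v) :: rest)
        = [(k, (List.foldl pvStepB (([] : List (List Int)), (none : Option Int))
            (PySem.List.sorted2 v (fun p => PySem.List.pyGetD p 1 0) (fun p => PySem.List.pyGetD p 0 0))).1)] := by
      unfold merge_overlapping_elements_alt
      rfl
    rw [hA, hB, pv_main]
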